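-- pv_equiv track=rewrite | github.com/EarthlyZ9/CodeitPython | 2. 알고리즘의 정석/약수터_GreedyAlgorithm.py | select_stops
-- ===== SOURCE A (Python) =====
-- def select_stops(water_stops, capacity):
--     point = 0
--     stop_list = []
--     for i in range(0, len(water_stops) - 1):
--         if water_stops[i] == point + capacity:
--             stop_list.append(water_stops[i])
--             point = water_stops[i]
--         elif (
--             water_stops[i] < point + capacity and water_stops[i + 1] > point + capacity
--         ):
--             stop_list.append(water_stops[i])
--             point = water_stops[i]
--     stop_list.append(water_stops[-1])
--     return stop_list
-- ===== SOURCE B (Python) =====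
-- def select_stops(water_stops, capacity):
--     last = water_stops[-1]
--
--     def seg(lo, hi, point):
--         # process pick-indices lo..hi-1 starting from `point`; returns (picks, new point)
--         if hi - lo == 1:
--             w, nxt, reach = water_stops[lo], water_stops[lo + 1], point + capacity
--             if w == reach or (w < reach and nxt > reach):
--                 return [w], w
--             return [], point
--         mid = (lo + hi) // 2
--         lp, p1 = seg(lo, mid, point)
--         rp, p2 = seg(mid, hi, p1)
--         return lp + rp, p2
--
--     n = len(water_stops)
--     picks = seg(0, n - 1, 0)[0] if n > 1 else []
--     return picks + [last]
-- ===== Notes on version B (the rewrite author's own statement) =====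
-- stated objective: alternative
-- what changed: Replaces A's single imperative left-to-right index loop with mutable point/list state by a divide-and-conquer recursion over index segments: each segment is split at the midpoint, the left half is solved first and its resulting refill point is threaded into the right half, and the picks of the two halves are concatenated; the final element is handled separately outside the recursion.
import Mathlib
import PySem

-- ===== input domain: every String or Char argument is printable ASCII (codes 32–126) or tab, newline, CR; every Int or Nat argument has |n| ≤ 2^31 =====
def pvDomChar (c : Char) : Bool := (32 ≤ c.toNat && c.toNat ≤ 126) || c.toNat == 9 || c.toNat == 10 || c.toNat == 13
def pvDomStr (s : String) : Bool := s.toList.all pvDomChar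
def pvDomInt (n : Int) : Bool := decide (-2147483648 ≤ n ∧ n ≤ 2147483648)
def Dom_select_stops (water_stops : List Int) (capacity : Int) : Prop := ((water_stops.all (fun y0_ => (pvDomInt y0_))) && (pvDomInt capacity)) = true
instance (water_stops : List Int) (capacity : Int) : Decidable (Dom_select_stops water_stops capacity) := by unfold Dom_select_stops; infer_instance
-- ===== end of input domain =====

-- B replaces A's single imperative index loop by a divide-and-conquer recursion over
-- index segments, threading the refill point from the left half into the right half
-- (alternative decomposition, not claimed faster; return value only — no mutation).

-- ===== PORT A =====
-- one loop step of A: i is the running index into water_stops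
def stepA (water_stops : List Int) (capacity : Int) (s : Int × List Int) (i : Int) : Int × List Int :=
  let wi := PySem.List.pyGetD water_stops i 0
  if wi = s.1 + capacity then (wi, s.2 ++ [wi])
  else if wi < s.1 + capacity ∧ PySem.List.pyGetD water_stops (i + 1) 0 > s.1 + capacity then
    (wi, s.2 ++ [wi])
  else s

def select_stops (water_stops : List Int) (capacity : Int) : List Int :=
  let r := (PySem.List.pyRange 0 ((water_stops.length : Int) - 1) 1).foldl
             (stepA water_stops capacity) (0, [])
  match PySem.List.pyGet? water_stops (-1) with  -- water_stops[-1]: IndexError on [] (outside Pre_)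
  | some last => r.2 ++ [last]
  | none => r.2

-- ===== PORT B =====
-- seg(lo, hi, point): process pick-indices lo..hi-1 from `point`, returning (picks, new point).
-- Indices are in range and nonnegative wherever Python reads them, so List.getD is exact.
-- The fuel argument (= segment length at the call site) only makes the recursion
-- structural / total; Source B's recursion always has enough fuel and never sees fuel 0.
def segB (water_stops : List Int) (capacity : Int) : Nat → Nat → Nat → Int → List Int × Int
  | 0, _, _, point => ([], point)   -- out-of-fuel guard, unreachable from select_stops_alt
  | fuel + 1, lo, hi, point =>
    if hi = lo + 1 then
      let w := water_stops.getD lo 0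
      let nxt := water_stops.getD (lo + 1) 0
      let reach := point + capacity
      if w = reach ∨ (w < reach ∧ nxt > reach) then ([w], w) else ([], point)
    else
      let mid := (lo + hi) / 2
      let l := segB water_stops capacity fuel lo mid point
      let r := segB water_stops capacity fuel mid hi l.2
      (l.1 ++ r.1, r.2)

def select_stops_alt (water_stops : List Int) (capacity : Int) : List Int :=
  match PySem.List.pyGet? water_stops (-1) with  -- last = water_stops[-1]
  | none => []   -- IndexError in Python; outside Pre_
  | some last =>
    let n := water_stops.length
    let picks := if 1 < n then (segB water_stops capacity (n - 1) 0 (n - 1) 0).1 else []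
    picks ++ [last]

-- ===== PRECONDITION & SPEC =====
-- Pre_: exactly the inputs where Python A returns (water_stops[-1] raises IndexError on [])
def Pre_select_stops (water_stops : List Int) (capacity : Int) : Prop := water_stops ≠ []
instance (water_stops : List Int) (capacity : Int) : Decidable (Pre_select_stops water_stops capacity) := by unfold Pre_select_stops; infer_instance

def pvWitness_select_stops : List Int × Int := ([0, 2, 5, 9], 3)

def Spec_select_stops (water_stops : List Int) (capacity : Int) (out : List Int) : Prop := out = select_stops_alt water_stops capacity
instance (water_stops : List Int) (capacity : Int) (out : List Int) : Decidable (Spec_select_stops water_stops capacity out) := by unfold Spec_select_stops; infer_instance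

-- ===== CLAIM (what is proved, stated in full; the proofs are below) =====
def Claim_equal_select_stops : Prop := ∀ (water_stops : List Int) (capacity : Int), Dom_select_stops water_stops capacity → Pre_select_stops water_stops capacity → Spec_select_stops water_stops capacity (select_stops water_stops capacity)

-- ===== LEMMAS AND PROOFS =====

-- the loop body of A, over natural indices and with List.getD (the bridge target)
def stepN (water_stops : List Int) (capacity : Int) (s : Int × List Int) (i : Nat) : Int × List Int :=
  let w := water_stops.getD i 0
  if w = s.1 + capacity ∨ (w < s.1 + capacity ∧ water_stops.getD (i + 1) 0 > s.1 + capacity) then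
    (w, s.2 ++ [w])
  else s

-- the accumulator of stepN only grows by appending: pull a prefix out of the fold
theorem foldl_stepN_acc (ws : List Int) (cap : Int) :
    ∀ (l : List Nat) (p : Int) (acc : List Int),
      l.foldl (stepN ws cap) (p, acc)
        = ((l.foldl (stepN ws cap) (p, [])).1, acc ++ (l.foldl (stepN ws cap) (p, [])).2) := by
  intro l
  induction l with
  | nil => intro p acc; simp
  | cons i t ih =>
    intro p acc
    simp only [List.foldl_cons]
    by_cases h : ws.getD i 0 = p + cap ∨ (ws.getD i 0 < p + cap ∧ ws.getD (i + 1) 0 > p + cap)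
    · simp only [stepN, if_pos h]
      rw [ih _ (acc ++ [ws.getD i 0]), ih _ ([] ++ [ws.getD i 0])]
      simp
    · simp only [stepN, if_neg h]
      exact ih p acc

-- segB over [lo, lo+k) computes A's fold over the same index range (state swapped)
theorem segB_spec (ws : List Int) (cap : Int) :
    ∀ (f k lo : Nat) (point : Int), 1 ≤ k → k ≤ f →
      segB ws cap f lo (lo + k) point
        = (((List.range' lo k).foldl (stepN ws cap) (point, [])).2,
           ((List.range' lo k).foldl (stepN ws cap) (point, [])).1) := by
  intro f
  induction f with
  | zero => intro k lo point hk hf; omega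
  | succ f ih =>
    intro k lo point hk hf
    rcases Nat.lt_or_ge k 2 with hk2 | hk2
    · have hk1 : k = 1 := by omega
      subst hk1
      simp only [segB, List.range'_one, List.foldl_cons, List.foldl_nil, stepN]
      split <;> first | (split <;> rfl) | simp_all
    · rw [show segB ws cap (f + 1) lo (lo + k) point
            = if lo + k = lo + 1 then
                (if ws.getD lo 0 = point + cap ∨ (ws.getD lo 0 < point + cap ∧ ws.getD (lo + 1) 0 > point + cap)
                 then ([ws.getD lo 0], ws.getD lo 0) else ([], point))
              else
                ((segB ws cap f lo ((lo + (lo + k)) / 2) point).1 ++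
                   (segB ws cap f ((lo + (lo + k)) / 2) (lo + k)
                      (segB ws cap f lo ((lo + (lo + k)) / 2) point).2).1,
                 (segB ws cap f ((lo + (lo + k)) / 2) (lo + k)
                    (segB ws cap f lo ((lo + (lo + k)) / 2) point).2).2) from rfl]
      rw [if_neg (by omega)]
      set m : Nat := (lo + (lo + k)) / 2 - lo with hm
      have hm1 : 1 ≤ m := by omega
      have hm2 : m ≤ f := by omega
      have hsplit : List.range' lo k = List.range' lo m ++ List.range' (lo + m) (k - m) := by
        rw [List.range'_append_1]
        congr 1
        omega
      rw [show (lo + (lo + k)) / 2 = lo + m by omega]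
      rw [ih m lo point hm1 hm2]
      rw [show lo + k = lo + m + (k - m) by omega,
          ih (k - m) (lo + m) _ (by omega) (by omega)]
      rw [hsplit, List.foldl_append]
      rw [foldl_stepN_acc ws cap (List.range' (lo + m) (k - m))
            ((List.range' lo m).foldl (stepN ws cap) (point, [])).1
            ((List.range' lo m).foldl (stepN ws cap) (point, [])).2]

-- A's Int-indexed fold over pyRange is the Nat-indexed stepN fold
theorem foldA_eq_foldN (ws : List Int) (cap : Int) (s : Int × List Int) :
    (PySem.List.pyRange 0 ((ws.length : Int) - 1) 1).foldl (stepA ws cap) s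
      = (List.range' 0 (ws.length - 1)).foldl (stepN ws cap) s := by
  rw [PySem.List.pyRange_one]
  simp only [sub_zero, List.foldl_map]
  have hlen : (((ws.length : Int) - 1)).toNat = ws.length - 1 := by omega
  rw [hlen, ← List.range_eq_range']
  apply PySem.List.foldl_congr_mem
  intro st i _
  have h1 : (0 : Int) + (i : Int) = ((i : Nat) : Int) := by omega
  simp only [stepA, stepN, h1, PySem.List.pyGetD_natCast]
  rw [show ((i : Int) + 1) = ((i + 1 : Nat) : Int) by push_cast; ring, PySem.List.pyGetD_natCast]
  split_ifs <;> first | rfl | tauto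

-- ===== VERDICT (by name: the statement is the Claim_ definition above) =====
theorem select_stops_spec : Claim_equal_select_stops := by
  intro ws cap _ hpre
  unfold Spec_select_stops select_stops select_stops_alt
  cases h : PySem.List.pyGet? ws (-1) with
  | none =>
    exfalso
    rw [PySem.List.pyGet?_neg_one] at h
    exact hpre (List.getLast?_eq_none_iff.mp h)
  | some last =>
    simp only [foldA_eq_foldN]
    by_cases hn : 1 < ws.length
    · rw [if_pos hn]
      have := segB_spec ws cap (ws.length - 1) (ws.length - 1) 0 0 (by omega) le_rfl
      rw [show 0 + (ws.length - 1) = ws.length - 1 by omega] at this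
      rw [this]
    · rw [if_neg hn]
      have : ws.length - 1 = 0 := by omega
      rw [this]
      simp
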